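-- pv_equiv track=rewrite | github.com/wzygxr/shuati | class073_DifferenceArray/Code10_Heaters.py | find_closest_heater
-- ===== SOURCE A (Python) =====
-- def find_closest_heater(house, heaters):
--     left = 0
--     right = len(heaters) - 1
--
--     # 处理边界情况：房屋在所有供暖器的左侧
--     if house <= heaters[0]:
--         return heaters[0] - house
--     # 处理边界情况：房屋在所有供暖器的右侧
--     if house >= heaters[right]:
--         return house - heaters[right]
--
--     # 二分查找
--     while left < right - 1:
--         mid = left + (right - left) // 2
--         if heaters[mid] == house:
--             return 0  # 房屋正好在供暖器位置
--         elif heaters[mid] < house: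
--             left = mid
--         else:
--             right = mid
--
--     # 此时，heaters[left] < house < heaters[right]，计算到两者的距离，取较小值
--     return min(house - heaters[left], heaters[right] - house)
-- ===== SOURCE B (Python) =====
-- def find_closest_heater(house, heaters):
--     if house <= heaters[0]:
--         return heaters[0] - house
--     if house >= heaters[-1]:
--         return house - heaters[-1]
--
--     def locate(lo, hi):
--         # recursive descent returning the final index bracket; an exact hit
--         # collapses to the degenerate bracket (mid, mid)
--         if lo >= hi - 1:
--             return lo, hi
--         mid = (lo + hi) // 2
--         if heaters[mid] < house:
--             return locate(mid, hi)
--         if heaters[mid] > house: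
--             return locate(lo, mid)
--         return mid, mid
--
--     lo, hi = locate(0, len(heaters) - 1)
--     return min(house - heaters[lo], heaters[hi] - house)
-- ===== Notes on version B (the rewrite author's own statement) =====
-- stated objective: alternative
-- what changed: B separates search from answer: a recursive locate(lo, hi) returns the final index bracket with the exact-hit case folded into the degenerate bracket (mid, mid), and a single min formula computes the distance once at the end - replacing A's while loop with its three interleaved early returns; the midpoint is (lo+hi)//2 and the last heater is read as heaters[-1].
import Mathlib
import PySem

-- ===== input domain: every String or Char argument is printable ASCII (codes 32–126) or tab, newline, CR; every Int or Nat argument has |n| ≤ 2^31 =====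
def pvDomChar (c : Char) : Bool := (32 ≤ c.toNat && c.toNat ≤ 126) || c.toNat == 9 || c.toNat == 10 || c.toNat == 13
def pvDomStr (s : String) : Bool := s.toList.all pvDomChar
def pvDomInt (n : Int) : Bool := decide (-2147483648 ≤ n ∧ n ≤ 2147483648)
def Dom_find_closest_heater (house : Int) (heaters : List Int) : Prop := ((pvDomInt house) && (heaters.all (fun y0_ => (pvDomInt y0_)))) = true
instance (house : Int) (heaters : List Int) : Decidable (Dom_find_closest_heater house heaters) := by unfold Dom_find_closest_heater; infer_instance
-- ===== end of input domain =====

-- B keeps A's exact values but separates search from answer: a recursive locate returns the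
-- final index bracket (exact hit folded into (mid,mid)) and one min formula computes the
-- distance, replacing A's while loop with three early returns (objective: alternative).


-- ===== PORT A =====
-- A's while loop: while left < right - 1: …  (pyGetD's default 0 is unreachable under Pre_;
-- fuel is a pure totality guard: right - left shrinks every iteration, so fuel = heaters.length never runs out)
def findLoopA (house : Int) (heaters : List Int) : Nat → Int → Int → Int
  | 0, left, right =>
      min (house - PySem.List.pyGetD heaters left 0) (PySem.List.pyGetD heaters right 0 - house)
  | Nat.succ f, left, right =>
      if left < right - 1 then
        if PySem.List.pyGetD heaters (left + PySem.Int.floordiv (right - left) 2) 0 = house then 0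
        else if PySem.List.pyGetD heaters (left + PySem.Int.floordiv (right - left) 2) 0 < house then
          findLoopA house heaters f (left + PySem.Int.floordiv (right - left) 2) right
        else findLoopA house heaters f left (left + PySem.Int.floordiv (right - left) 2)
      else
        min (house - PySem.List.pyGetD heaters left 0) (PySem.List.pyGetD heaters right 0 - house)

-- Python A raises IndexError on heaters[0] / heaters[right] for the empty list; Pre_ excludes it.
def find_closest_heater (house : Int) (heaters : List Int) : Int :=
  if house ≤ PySem.List.pyGetD heaters 0 0 then
    PySem.List.pyGetD heaters 0 0 - house
  else if house ≥ PySem.List.pyGetD heaters ((heaters.length : Int) - 1) 0 then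
    house - PySem.List.pyGetD heaters ((heaters.length : Int) - 1) 0
  else
    findLoopA house heaters heaters.length 0 ((heaters.length : Int) - 1)

-- ===== PORT B =====
-- B's recursive locate(lo, hi): returns the final index bracket; an exact hit collapses to
-- the degenerate bracket (mid, mid).  Same fuel guard as A's loop.
def locateB (house : Int) (heaters : List Int) : Nat → Int → Int → Int × Int
  | 0, lo, hi => (lo, hi)
  | Nat.succ f, lo, hi =>
      if lo ≥ hi - 1 then (lo, hi)
      else
        if PySem.List.pyGetD heaters (PySem.Int.floordiv (lo + hi) 2) 0 < house then
          locateB house heaters f (PySem.Int.floordiv (lo + hi) 2) hi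
        else if house < PySem.List.pyGetD heaters (PySem.Int.floordiv (lo + hi) 2) 0 then
          locateB house heaters f lo (PySem.Int.floordiv (lo + hi) 2)
        else (PySem.Int.floordiv (lo + hi) 2, PySem.Int.floordiv (lo + hi) 2)

-- Python B raises IndexError on heaters[0] for the empty list; Pre_ excludes it.
def find_closest_heater_alt (house : Int) (heaters : List Int) : Int :=
  if house ≤ PySem.List.pyGetD heaters 0 0 then
    PySem.List.pyGetD heaters 0 0 - house
  else if house ≥ PySem.List.pyGetD heaters (-1) 0 then
    house - PySem.List.pyGetD heaters (-1) 0
  else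
    min (house - PySem.List.pyGetD heaters
          (locateB house heaters heaters.length 0 ((heaters.length : Int) - 1)).1 0)
        (PySem.List.pyGetD heaters
          (locateB house heaters heaters.length 0 ((heaters.length : Int) - 1)).2 0 - house)

-- ===== PRECONDITION & SPEC =====
-- Pre_ excludes exactly the empty list, on which Python A (and Python B alike) raises IndexError.
def Pre_find_closest_heater (house : Int) (heaters : List Int) : Prop := heaters ≠ []
instance (house : Int) (heaters : List Int) : Decidable (Pre_find_closest_heater house heaters) := by
  unfold Pre_find_closest_heater; infer_instance

def pvWitness_find_closest_heater : Int × List Int := (6, [1, 4, 9, 9, 20])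

def Spec_find_closest_heater (house : Int) (heaters : List Int) (out : Int) : Prop := out = find_closest_heater_alt house heaters
instance (house : Int) (heaters : List Int) (out : Int) : Decidable (Spec_find_closest_heater house heaters out) := by unfold Spec_find_closest_heater; infer_instance

-- ===== CLAIM (what is proved, stated in full; the proofs are below) =====
def Claim_equal_find_closest_heater : Prop := ∀ (house : Int) (heaters : List Int), Dom_find_closest_heater house heaters → Pre_find_closest_heater house heaters → Spec_find_closest_heater house heaters (find_closest_heater house heaters)

-- ===== LEMMAS AND PROOFS =====

-- B's midpoint (lo + hi) // 2 is A's lo + (hi - lo) // 2, for every lo, hi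
lemma mid_eq (lo hi : Int) :
    PySem.Int.floordiv (lo + hi) 2 = lo + PySem.Int.floordiv (hi - lo) 2 := by
  rw [PySem.Int.floordiv_eq_ediv_of_pos (by norm_num),
      PySem.Int.floordiv_eq_ediv_of_pos (by norm_num)]
  omega

-- A's loop equals B's bracket search followed by the single min formula, on every state
lemma loop_eq_locate (house : Int) (heaters : List Int) :
    ∀ (fuel : Nat) (lo hi : Int),
      findLoopA house heaters fuel lo hi =
        min (house - PySem.List.pyGetD heaters (locateB house heaters fuel lo hi).1 0)
            (PySem.List.pyGetD heaters (locateB house heaters fuel lo hi).2 0 - house) := by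
  intro fuel
  induction fuel with
  | zero => intro lo hi; rfl
  | succ f ih =>
    intro lo hi
    rw [findLoopA, locateB]
    by_cases hc : lo < hi - 1
    · rw [if_pos hc, if_neg (by omega : ¬ lo ≥ hi - 1), mid_eq lo hi]
      set m := lo + PySem.Int.floordiv (hi - lo) 2 with hm
      by_cases he : PySem.List.pyGetD heaters m 0 = house
      · rw [if_pos he, if_neg (by rw [he]; exact lt_irrefl house),
            if_neg (by rw [he]; exact lt_irrefl house)]
        rw [he]
        simp
      · rw [if_neg he]
        by_cases hlt : PySem.List.pyGetD heaters m 0 < house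
        · rw [if_pos hlt, if_pos hlt]
          exact ih m hi
        · rw [if_neg hlt, if_neg hlt,
              if_pos (lt_of_le_of_ne (not_lt.mp hlt) (Ne.symm he))]
          exact ih lo m
    · rw [if_neg hc, if_pos (by omega : lo ≥ hi - 1)]

-- heaters[-1] is heaters[len(heaters) - 1] on a nonempty list
lemma pyGetD_neg_one_eq_last (heaters : List Int) (hne : heaters ≠ []) :
    PySem.List.pyGetD heaters (-1) 0 =
      PySem.List.pyGetD heaters ((heaters.length : Int) - 1) 0 := by
  have hlen : 0 < heaters.length := List.length_pos_of_ne_nil hne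
  rw [PySem.List.pyGetD_neg_one heaters 0 hne,
      PySem.List.pyGetD_eq_getElem heaters 0 (by omega) (by omega),
      List.getLast_eq_getElem hne]
  congr 1
  omega

-- ===== VERDICT (by name: the statement is the Claim_ definition above) =====
theorem find_closest_heater_spec : Claim_equal_find_closest_heater := by
  intro house heaters _hdom hpre
  unfold Spec_find_closest_heater
  rw [find_closest_heater, find_closest_heater_alt,
      pyGetD_neg_one_eq_last heaters hpre,
      loop_eq_locate house heaters]
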